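-- pv_equiv track=rewrite | github.com/AmdyC/Recuperatorio-Python | script.py | split_users
-- ===== SOURCE A (Python) =====
-- def split_users(users):
--     users_vowels = []
--     users_consonants = []
--
--     for user in users:
--         name = user['name']
--         if name[0].lower() in 'aeiou':
--             users_vowels.append(user)
--         else:
--             users_consonants.append(user)
--
--     return users_vowels, users_consonants
-- ===== SOURCE B (Python) =====
-- def split_users(users):
--     is_cons = lambda u: u['name'][0].lower() not in 'aeiou'
--     arranged = sorted(users, key=is_cons)
--     k = [is_cons(u) for u in users].count(False)
--     return arranged[:k], arranged[k:]
-- ===== Notes on version B (the rewrite author's own statement) =====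
-- stated objective: alternative
-- what changed: Replaces the single partitioning loop by a stable sort on the boolean key 'first letter is a consonant' (False sorts before True, stability preserves order), then splits the sorted list at the vowel count; correct because a stable sort on a two-valued key is exactly a stable partition.
-- outside the precondition, e.g. on split_users([{'name': ''}]): A raises IndexError, B raises IndexError; on split_users([{'id': '1'}]): A raises KeyError, B raises KeyError
import Mathlib
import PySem

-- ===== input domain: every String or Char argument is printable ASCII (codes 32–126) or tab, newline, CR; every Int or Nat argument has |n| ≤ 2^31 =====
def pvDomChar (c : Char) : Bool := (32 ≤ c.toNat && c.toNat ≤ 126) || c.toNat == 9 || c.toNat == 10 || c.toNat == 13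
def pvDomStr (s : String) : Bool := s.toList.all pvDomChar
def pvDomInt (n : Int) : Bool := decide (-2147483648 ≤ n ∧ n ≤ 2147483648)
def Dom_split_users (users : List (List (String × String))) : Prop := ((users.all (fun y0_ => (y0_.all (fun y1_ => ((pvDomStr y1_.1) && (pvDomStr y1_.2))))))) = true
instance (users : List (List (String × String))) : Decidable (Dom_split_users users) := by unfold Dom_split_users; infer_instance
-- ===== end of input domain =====

-- B replaces A's partitioning loop by a stable sort on the boolean consonant key and a split at the vowel count; equal return values on Pre_.

-- ===== PORT A =====
-- name[0].lower() in 'aeiou'; the getD defaults never fire under Pre_ (Python raises there)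
def split_users (users : List (List (String × String))) : (List (List (String × String))) × (List (List (String × String))) :=
  users.foldl
    (fun (acc : List (List (String × String)) × List (List (String × String))) user =>
      let name := (user.lookup "name").getD ""
      if PySem.Chars.isIn [PySem.Chars.lowerChar ((PySem.Str.pyGet? name 0).getD ' ')] "aeiou".toList
      then (acc.1 ++ [user], acc.2)
      else (acc.1, acc.2 ++ [user]))
    ([], [])

-- ===== PORT B =====
-- is_cons(u): u['name'][0].lower() not in 'aeiou'
def pvIsCons (user : List (String × String)) : Bool :=
  !(PySem.Chars.isIn
      [PySem.Chars.lowerChar ((PySem.Str.pyGet? ((user.lookup "name").getD "") 0).getD ' ')]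
      "aeiou".toList)

-- arranged = sorted(users, key=is_cons); k = [is_cons(u) for u in users].count(False); arranged[:k], arranged[k:]
def split_users_alt (users : List (List (String × String))) : (List (List (String × String))) × (List (List (String × String))) :=
  let arranged := PySem.List.sorted users pvIsCons
  let k := PySem.List.count (users.map pvIsCons) false
  (PySem.List.slice arranged none (some (k : Int)),
   PySem.List.slice arranged (some (k : Int)) none)

-- ===== PRECONDITION & SPEC =====
-- Pre_ excludes inputs on which A raises: a user dict without a 'name' key (KeyError) or with an empty name (IndexError); B raises there too.
def Pre_split_users (users : List (List (String × String))) : Prop :=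
  (users.all (fun u => ((u.lookup "name").getD "") ≠ "")) = true
instance (users : List (List (String × String))) : Decidable (Pre_split_users users) := by unfold Pre_split_users; infer_instance
def pvWitness_split_users : (List (List (String × String))) := [[("name", "Ana")], [("name", "bob")]]
def Spec_split_users (users : List (List (String × String))) (out : (List (List (String × String))) × (List (List (String × String)))) : Prop := out = split_users_alt users
instance (users : List (List (String × String))) (out : (List (List (String × String))) × (List (List (String × String)))) : Decidable (Spec_split_users users out) := by unfold Spec_split_users; infer_instance

-- ===== CLAIM (what is proved, stated in full; the proofs are below) =====
def Claim_equal_split_users : Prop := ∀ (users : List (List (String × String))), Dom_split_users users → Pre_split_users users → Spec_split_users users (split_users users)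

-- ===== LEMMAS AND PROOFS =====

-- A's fold is the stable partition (vowels, consonants)
theorem split_users_fold_inv (users : List (List (String × String)))
    (v c : List (List (String × String))) :
    users.foldl
      (fun (acc : List (List (String × String)) × List (List (String × String))) user =>
        if !pvIsCons user then (acc.1 ++ [user], acc.2) else (acc.1, acc.2 ++ [user]))
      (v, c)
    = (v ++ users.filter (fun u => !pvIsCons u), c ++ users.filter pvIsCons) := by
  induction users generalizing v c with
  | nil => simp
  | cons u rest ih =>
    simp only [List.foldl_cons, List.filter_cons]
    by_cases h : pvIsCons u
    · simpa [h, List.append_assoc] using ih v (c ++ [u])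
    · simpa [h, List.append_assoc] using ih (v ++ [u]) c

-- inserting a vowel (key false) into falses ++ trues lands between them
theorem insertBy_false (x : List (String × String)) (hx : pvIsCons x = false)
    (F T : List (List (String × String)))
    (hF : ∀ f ∈ F, pvIsCons f = false) (hT : ∀ t ∈ T, pvIsCons t = true) :
    PySem.List.insertBy (fun a b => decide (pvIsCons a < pvIsCons b)) x (F ++ T)
    = F ++ x :: T := by
  induction F with
  | nil =>
    cases T with
    | nil => simp [PySem.List.insertBy]
    | cons t ts => simp [PySem.List.insertBy, hx, hT t (by simp)]
  | cons f fs ih =>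
    simp only [List.cons_append, PySem.List.insertBy]
    rw [hx, hF f (by simp)]
    simp only [decide_eq_true_eq]
    rw [if_neg (by simp)]
    exact congrArg (f :: ·) (ih (fun g hg => hF g (by simp [hg])))

-- inserting a consonant (key true) goes to the end
theorem insertBy_true (x : List (String × String)) (hx : pvIsCons x = true)
    (L : List (List (String × String))) :
    PySem.List.insertBy (fun a b => decide (pvIsCons a < pvIsCons b)) x L = L ++ [x] := by
  apply PySem.List.insertBy_of_forall_not_before
  intro y _
  simp [hx]

-- the insertion-sort fold keeps the invariant 'falses then trues, each stable'
theorem sorted_fold_inv (users F T : List (List (String × String)))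
    (hF : ∀ f ∈ F, pvIsCons f = false) (hT : ∀ t ∈ T, pvIsCons t = true) :
    users.foldl
      (fun acc x => PySem.List.insertBy (fun a b => decide (pvIsCons a < pvIsCons b)) x acc)
      (F ++ T)
    = (F ++ users.filter (fun u => !pvIsCons u)) ++ (T ++ users.filter pvIsCons) := by
  induction users generalizing F T with
  | nil => simp
  | cons u rest ih =>
    simp only [List.foldl_cons, List.filter_cons]
    by_cases h : pvIsCons u
    · rw [insertBy_true u h, List.append_assoc]
      simpa [h, List.append_assoc] using ih F (T ++ [u]) hF
        (fun t ht => by rcases List.mem_append.1 ht with h' | h' <;> simp_all)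
    · rw [insertBy_false u (by simpa using h) F T hF hT,
        show F ++ u :: T = (F ++ [u]) ++ T by simp]
      simpa [h, List.append_assoc] using ih (F ++ [u]) T
        (fun f hf => by rcases List.mem_append.1 hf with h' | h' <;> simp_all) hT

theorem sorted_is_partition (users : List (List (String × String))) :
    PySem.List.sorted users pvIsCons
    = users.filter (fun u => !pvIsCons u) ++ users.filter pvIsCons := by
  rw [PySem.List.sorted_eq_foldl_insertBy]
  simpa using sorted_fold_inv users [] [] (by simp) (by simp)

theorem count_false_eq_length (users : List (List (String × String))) :
    PySem.List.count (users.map pvIsCons) false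
    = (users.filter (fun u => !pvIsCons u)).length := by
  rw [PySem.List.count_eq]
  induction users with
  | nil => rfl
  | cons u rest ih =>
    cases h : pvIsCons u <;>
      simp [List.map_cons, h, ih]

-- ===== VERDICT (by name: the statement is the Claim_ definition above) =====
theorem split_users_spec : Claim_equal_split_users := by
  intro users _ _
  show split_users users = split_users_alt users
  have hA : split_users users
      = (users.filter (fun u => !pvIsCons u), users.filter pvIsCons) := by
    have : split_users users
        = users.foldl
            (fun (acc : List (List (String × String)) × List (List (String × String))) user =>
              if !pvIsCons user then (acc.1 ++ [user], acc.2) else (acc.1, acc.2 ++ [user]))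
            ([], []) := by
      simp only [split_users, pvIsCons, Bool.not_not]
    rw [this, split_users_fold_inv]; simp
  rw [hA, split_users_alt]
  simp only [sorted_is_partition, count_false_eq_length]
  rw [PySem.List.slice_to_natCast, PySem.List.slice_from_natCast,
    List.take_left, List.drop_left]
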